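-- pv_equiv track=rewrite | github.com/juanvallaure1/TFGJuan | algoritmos_geneticos_para_la_composicion_musical.py | recompensa_acorde_compacto
-- ===== SOURCE A (Python) =====
-- def recompensa_acorde_compacto(lista_notas:list ):
--     recompensa = 0
--     for i in range(len(lista_notas)//3):
--         acorde = lista_notas[i*3:i*3+3]
--
--         acorde = sorted(acorde)
--
--
--         condicion = abs(acorde[0] -acorde[1]) + abs(acorde[1] - acorde[2])
--         if condicion <= 12:
--             recompensa += 1
--         if condicion <= 9:
--             recompensa += 1
--     return recompensa
-- ===== SOURCE B (Python) =====
-- def recompensa_acorde_compacto(lista_notas: list):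
--     # Streaming state machine: one flat pass over the notes keeping a running
--     # minimum/maximum and a position counter; every third note closes a chord,
--     # whose spread hi - lo (= sorted adjacent-difference sum) is scored.
--     # No chunking, no slicing, no sorting, no index arithmetic.
--     total = 0
--     cnt = 0
--     lo = hi = 0
--     for x in lista_notas:
--         if cnt == 0:
--             lo = hi = x
--         else:
--             if x < lo:
--                 lo = x
--             if x > hi:
--                 hi = x
--         cnt += 1
--         if cnt == 3:
--             d = hi - lo
--             total += (d <= 12) + (d <= 9)
--             cnt = 0
--     return total
-- ===== Notes on version B (the rewrite author's own statement) =====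
-- stated objective: alternative
-- what changed: B replaces A's per-chord loop (slice a group of three, sort it, sum adjacent absolute differences) by a single flat streaming pass over the note list that maintains a running min/max and a modular position counter, scoring the spread hi - lo each time the counter closes a chord.
import Mathlib
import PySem

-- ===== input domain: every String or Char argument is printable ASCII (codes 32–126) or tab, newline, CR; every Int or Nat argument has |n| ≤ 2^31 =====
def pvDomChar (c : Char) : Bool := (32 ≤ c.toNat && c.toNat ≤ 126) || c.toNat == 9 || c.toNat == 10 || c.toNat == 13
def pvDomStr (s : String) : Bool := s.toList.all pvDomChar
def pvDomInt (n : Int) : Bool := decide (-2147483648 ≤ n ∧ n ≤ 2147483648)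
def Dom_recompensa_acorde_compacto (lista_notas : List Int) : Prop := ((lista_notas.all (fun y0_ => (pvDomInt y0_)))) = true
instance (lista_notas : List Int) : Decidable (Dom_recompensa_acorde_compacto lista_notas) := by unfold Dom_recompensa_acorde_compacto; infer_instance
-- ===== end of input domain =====

-- B replaces A's slice/sort/adjacent-difference chord loop by a single flat streaming
-- pass with a running min/max and a modular counter; objective: alternative (same return value).

-- ===== PORT A =====
def recompensa_acorde_compacto (lista_notas : List Int) : Int :=
  (PySem.List.pyRange 0 (PySem.Int.floordiv (lista_notas.length : Int) 3) 1).foldl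
    (fun recompensa i =>
      let acorde := PySem.List.slice lista_notas (some (i * 3)) (some (i * 3 + 3))
      let acorde := PySem.List.sorted acorde (fun x => x) false
      let condicion := |PySem.List.pyGetD acorde 0 0 - PySem.List.pyGetD acorde 1 0| +
                       |PySem.List.pyGetD acorde 1 0 - PySem.List.pyGetD acorde 2 0|
      let recompensa := if condicion ≤ 12 then recompensa + 1 else recompensa
      if condicion ≤ 9 then recompensa + 1 else recompensa)
    0

-- ===== PORT B =====
-- one step of Source B's loop body on the state (total, cnt, lo, hi)
def pvStepB (s : Int × Nat × Int × Int) (x : Int) : Int × Nat × Int × Int :=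
  let lo := if s.2.1 = 0 then x else if x < s.2.2.1 then x else s.2.2.1
  let hi := if s.2.1 = 0 then x else if x > s.2.2.2 then x else s.2.2.2
  let cnt := s.2.1 + 1
  if cnt = 3 then
    let d := hi - lo
    (s.1 + ((if d ≤ 12 then (1 : Int) else 0) + (if d ≤ 9 then 1 else 0)), 0, lo, hi)
  else
    (s.1, cnt, lo, hi)

def recompensa_acorde_compacto_alt (lista_notas : List Int) : Int :=
  (lista_notas.foldl pvStepB (0, 0, 0, 0)).1

-- ===== PRECONDITION & SPEC =====
def Spec_recompensa_acorde_compacto (lista_notas : List Int) (out : Int) : Prop := out = recompensa_acorde_compacto_alt lista_notas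
instance (lista_notas : List Int) (out : Int) : Decidable (Spec_recompensa_acorde_compacto lista_notas out) := by unfold Spec_recompensa_acorde_compacto; infer_instance

-- ===== CLAIM (what is proved, stated in full; the proofs are below) =====
def Claim_equal_recompensa_acorde_compacto : Prop := ∀ (lista_notas : List Int), Dom_recompensa_acorde_compacto lista_notas → Spec_recompensa_acorde_compacto lista_notas (recompensa_acorde_compacto lista_notas)

-- ===== LEMMAS AND PROOFS =====

-- chord-sum mirror used to relate both ports (proof helper only)
def pvMirror : List Int → Int
  | a :: b :: c :: rest =>
    let spread := max a (max b c) - min a (min b c)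
    ((if spread ≤ 12 then (1 : Int) else 0) + (if spread ≤ 9 then 1 else 0)) + pvMirror rest
  | _ => 0

-- A's contribution for the chunk with index k
def pvG (xs : List Int) (k : Nat) : Int :=
  let acorde := PySem.List.sorted (PySem.List.slice xs (some ((k : Int) * 3)) (some ((k : Int) * 3 + 3))) (fun x => x) false
  let condicion := |PySem.List.pyGetD acorde 0 0 - PySem.List.pyGetD acorde 1 0| +
                   |PySem.List.pyGetD acorde 1 0 - PySem.List.pyGetD acorde 2 0|
  (if condicion ≤ 12 then (1 : Int) else 0) + (if condicion ≤ 9 then 1 else 0)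

lemma pv_floordiv3 (m : Nat) : PySem.Int.floordiv (m : Int) 3 = ((m / 3 : Nat) : Int) := by
  simp [PySem.Int.floordiv, Int.fdiv_eq_ediv]

lemma pv_sorted3 (a b c : Int) :
    ∃ x y z, PySem.List.sorted [a, b, c] (fun t => t) false = [x, y, z] ∧
      x ≤ y ∧ y ≤ z ∧ x = min a (min b c) ∧ z = max a (max b c) := by
  have mm : ∀ x y z : Int, x ≤ y → y ≤ z → ([x, y, z].Perm [a, b, c]) →
      PySem.List.sorted [a, b, c] (fun t => t) false = [x, y, z] := by
    intro x y z h h' hp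
    exact PySem.List.sorted_id_eq_of_perm_of_pairwise _ _ hp (by simp; omega)
  rcases le_total a b with h1 | h1 <;> rcases le_total b c with h2 | h2 <;> rcases le_total a c with h3 | h3
  · exact ⟨a, b, c, mm a b c h1 h2 (List.Perm.refl _), h1, h2,
      by simp [min_def, max_def]; split_ifs <;> omega, by simp [min_def, max_def]; split_ifs <;> omega⟩
  · exact ⟨a, b, c, mm a b c h1 h2 (List.Perm.refl _), h1, h2,
      by simp [min_def, max_def]; split_ifs <;> omega, by simp [min_def, max_def]; split_ifs <;> omega⟩
  · exact ⟨a, c, b, mm a c b h3 h2 (List.Perm.cons a (List.Perm.swap b c [])), h3, h2,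
      by simp [min_def, max_def]; split_ifs <;> omega, by simp [min_def, max_def]; split_ifs <;> omega⟩
  · exact ⟨c, a, b, mm c a b h3 h1 ((List.Perm.swap a c [b]).trans (List.Perm.cons a (List.Perm.swap b c []))), h3, h1,
      by simp [min_def, max_def]; split_ifs <;> omega, by simp [min_def, max_def]; split_ifs <;> omega⟩
  · exact ⟨b, a, c, mm b a c h1 h3 (List.Perm.swap a b [c]), h1, h3,
      by simp [min_def, max_def]; split_ifs <;> omega, by simp [min_def, max_def]; split_ifs <;> omega⟩
  · exact ⟨b, c, a, mm b c a h2 h3 ((List.Perm.cons b (List.Perm.swap a c [])).trans (List.Perm.swap a b [c])), h2, h3,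
      by simp [min_def, max_def]; split_ifs <;> omega, by simp [min_def, max_def]; split_ifs <;> omega⟩
  · exact ⟨a, b, c, mm a b c (by omega) (by omega) (List.Perm.refl _), by omega, by omega,
      by simp [min_def, max_def]; split_ifs <;> omega, by simp [min_def, max_def]; split_ifs <;> omega⟩
  · exact ⟨c, b, a, mm c b a h2 h1 (List.reverse_perm [a, b, c]), h2, h1,
      by simp [min_def, max_def]; split_ifs <;> omega, by simp [min_def, max_def]; split_ifs <;> omega⟩

lemma pv_chunk (a b c : Int) (rest : List Int) :
    pvG (a :: b :: c :: rest) 0 =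
      (if max a (max b c) - min a (min b c) ≤ 12 then (1 : Int) else 0) +
      (if max a (max b c) - min a (min b c) ≤ 9 then 1 else 0) := by
  obtain ⟨x, y, z, hs, hxy, hyz, hx, hz⟩ := pv_sorted3 a b c
  unfold pvG
  have hsl : PySem.List.slice (a :: b :: c :: rest) (some (((0 : Nat) : Int) * 3)) (some (((0 : Nat) : Int) * 3 + 3)) = [a, b, c] := by
    simp [pysem]
  rw [hsl, hs]
  have g0 : PySem.List.pyGetD [x, y, z] 0 0 = x := rfl
  have g1 : PySem.List.pyGetD [x, y, z] 1 0 = y := rfl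
  have g2 : PySem.List.pyGetD [x, y, z] 2 0 = z := rfl
  simp only [g0, g1, g2]
  have e1 : |x - y| = y - x := by rw [abs_sub_comm]; exact abs_of_nonneg (by omega)
  have e2 : |y - z| = z - y := by rw [abs_sub_comm]; exact abs_of_nonneg (by omega)
  rw [e1, e2, ← hx, ← hz]
  split_ifs <;> omega

lemma pv_A_eq_sum (xs : List Int) :
    recompensa_acorde_compacto xs = ((List.range (xs.length / 3)).map (pvG xs)).sum := by
  unfold recompensa_acorde_compacto
  rw [pv_floordiv3, PySem.List.pyRange_one]
  simp only [Int.sub_zero, Int.toNat_natCast, List.foldl_map]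
  rw [List.foldl_ext _ (fun (acc : Int) (k : Nat) => acc + pvG xs k) 0
        (by intro acc k _
            simp only [Int.zero_add, pvG]
            split_ifs <;> omega),
      PySem.List.foldl_add (List.range (xs.length / 3)) (pvG xs) 0]
  omega

lemma pv_G_shift (a b c : Int) (rest : List Int) (k : Nat) :
    pvG (a :: b :: c :: rest) (k + 1) = pvG rest k := by
  unfold pvG
  have h1 : PySem.List.slice (a :: b :: c :: rest) (some (((k + 1 : Nat) : Int) * 3)) (some (((k + 1 : Nat) : Int) * 3 + 3))
      = PySem.List.slice rest (some ((k : Int) * 3)) (some ((k : Int) * 3 + 3)) := by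
    rw [show (((k + 1 : Nat) : Int) * 3) = ((3 * k + 3 : Nat) : Int) by push_cast; ring,
        show (((3 * k + 3 : Nat) : Int) + 3) = ((3 * k + 6 : Nat) : Int) by push_cast; ring,
        show ((k : Int) * 3) = ((3 * k : Nat) : Int) by push_cast; ring,
        show (((3 * k : Nat) : Int) + 3) = ((3 * k + 3 : Nat) : Int) by push_cast; ring,
        PySem.List.slice_natCast, PySem.List.slice_natCast]
    have hd : (a :: b :: c :: rest).drop (3 * k + 3) = rest.drop (3 * k) := by
      rw [show 3 * k + 3 = (3 * k + 2) + 1 by ring, List.drop_succ_cons,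
          show 3 * k + 2 = (3 * k + 1) + 1 by ring, List.drop_succ_cons,
          show 3 * k + 1 = 3 * k + 1 by rfl, List.drop_succ_cons]
    rw [hd]
    congr 1
    omega
  rw [h1]

lemma pv_A_eq_mirror (xs : List Int) : recompensa_acorde_compacto xs = pvMirror xs := by
  induction xs using pvMirror.induct with
  | case1 a b c rest ih =>
    rw [pv_A_eq_sum]
    have hlen : (a :: b :: c :: rest).length / 3 = rest.length / 3 + 1 := by
      simp only [List.length_cons]; omega
    rw [hlen, List.range_succ_eq_map]
    simp only [List.map_cons, List.map_map, List.sum_cons]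
    rw [List.map_congr_left (fun k _ => by
      show (pvG (a :: b :: c :: rest) ∘ Nat.succ) k = pvG rest k
      exact pv_G_shift a b c rest k)]
    rw [← pv_A_eq_sum, pv_chunk, ih]
    simp [pvMirror]
  | case2 x h =>
    rw [pv_A_eq_sum]
    rcases x with _ | ⟨a, _ | ⟨b, _ | ⟨c, r⟩⟩⟩
    · simp [pvMirror]
    · simp [pvMirror]
    · simp [pvMirror]
    · exact absurd rfl (fun hh => h a b c r hh)

-- three streaming steps starting at a chord boundary close exactly one chord
lemma pv_step3 (t lo hi a b c : Int) :
    pvStepB (pvStepB (pvStepB (t, 0, lo, hi) a) b) c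
      = (t + ((if max a (max b c) - min a (min b c) ≤ 12 then (1 : Int) else 0)
            + (if max a (max b c) - min a (min b c) ≤ 9 then 1 else 0)), 0,
         min a (min b c), max a (max b c)) := by
  have h1 : pvStepB (t, 0, lo, hi) a = (t, 1, a, a) := by
    simp [pvStepB]
  have h2 : pvStepB (t, 1, a, a) b = (t, 2, if b < a then b else a, if b > a then b else a) := by
    simp [pvStepB]
  have hL : (if c < (if b < a then b else a) then c else (if b < a then b else a))
      = min a (min b c) := by
    simp only [min_def]; split_ifs <;> omega
  have hH : (if c > (if b > a then b else a) then c else (if b > a then b else a))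
      = max a (max b c) := by
    simp only [max_def]; split_ifs <;> omega
  have h3 : pvStepB (t, 2, if b < a then b else a, if b > a then b else a) c
      = (t + ((if max a (max b c) - min a (min b c) ≤ 12 then (1 : Int) else 0)
            + (if max a (max b c) - min a (min b c) ≤ 9 then 1 else 0)), 0,
         min a (min b c), max a (max b c)) := by
    simp only [pvStepB]
    norm_num
    rw [hL, hH]
    refine ⟨?_, rfl, rfl⟩
    split_ifs <;> omega
  rw [h1, h2, h3]

-- the streaming fold, started at the beginning of a chord, computes the chord sum
lemma pv_fold_mirror (xs : List Int) : ∀ (t lo hi : Int),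
    (xs.foldl pvStepB (t, 0, lo, hi)).1 = t + pvMirror xs := by
  induction xs using pvMirror.induct with
  | case1 a b c rest ih =>
    intro t lo hi
    simp only [List.foldl_cons]
    rw [pv_step3, ih]
    simp only [pvMirror]
    ring
  | case2 x h =>
    rcases x with _ | ⟨a, _ | ⟨b, _ | ⟨c, r⟩⟩⟩
    · intro t lo hi; simp [pvMirror]
    · intro t lo hi; simp [List.foldl_cons, pvStepB, pvMirror]
    · intro t lo hi; simp [List.foldl_cons, pvStepB, pvMirror]
    · exact absurd rfl (fun hh => h a b c r hh)

-- ===== VERDICT (by name: the statement is the Claim_ definition above) =====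
theorem recompensa_acorde_compacto_spec : Claim_equal_recompensa_acorde_compacto := by
  intro xs _
  unfold Spec_recompensa_acorde_compacto recompensa_acorde_compacto_alt
  rw [pv_fold_mirror xs 0 0 0, pv_A_eq_mirror]
  omega
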